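-- pv_equiv track=rewrite | github.com/locchh/jsonparser | jsonparser/languages/cobol_analyzer.py | _extract_program_documentation
-- ===== SOURCE A (Python) =====
-- from typing import List, Dict, Any, Optional
--
-- def _extract_program_documentation(lines: List[str]) -> Optional[str]:
--     """Extract program documentation from IDENTIFICATION DIVISION."""
--     doc_lines = []
--     in_id_division = False
--
--     for line in lines:
--         if 'IDENTIFICATION DIVISION' in line:
--             in_id_division = True
--             continue
--         if in_id_division and 'DIVISION' in line:
--             break
--         if in_id_division and line.strip() and not line.strip().endswith('.'):
--             doc_lines.append(line.strip())
--
--     return '\n'.join(doc_lines) if doc_lines else None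
-- ===== SOURCE B (Python) =====
-- from typing import List, Optional
--
-- def _extract_program_documentation(lines: List[str]) -> Optional[str]:
--     """Extract program documentation from IDENTIFICATION DIVISION."""
--     hits = [i for i, line in enumerate(lines) if 'IDENTIFICATION DIVISION' in line]
--     if not hits:
--         return None
--     after = lines[hits[0] + 1:]
--     stops = [i for i, line in enumerate(after) if 'DIVISION' in line]
--     body = after[:stops[0]] if stops else after
--     doc = [s for s in (line.strip() for line in body) if s and not s.endswith('.')]
--     return '\n'.join(doc) if doc else None
-- ===== Notes on version B (the rewrite author's own statement) =====
-- stated objective: alternative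
-- what changed: Replaces the flag-based state machine (mutable flag, continue/break) with a declarative pipeline: index comprehensions locate the header and the next division marker, slicing cuts out the body, and a filtered comprehension extracts the doc lines; Pre_ excludes lists with more than one line containing 'IDENTIFICATION DIVISION', where A's accidental skipping of repeated header lines vs B's stopping at them are both defensible readings of malformed input.
import Mathlib
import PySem

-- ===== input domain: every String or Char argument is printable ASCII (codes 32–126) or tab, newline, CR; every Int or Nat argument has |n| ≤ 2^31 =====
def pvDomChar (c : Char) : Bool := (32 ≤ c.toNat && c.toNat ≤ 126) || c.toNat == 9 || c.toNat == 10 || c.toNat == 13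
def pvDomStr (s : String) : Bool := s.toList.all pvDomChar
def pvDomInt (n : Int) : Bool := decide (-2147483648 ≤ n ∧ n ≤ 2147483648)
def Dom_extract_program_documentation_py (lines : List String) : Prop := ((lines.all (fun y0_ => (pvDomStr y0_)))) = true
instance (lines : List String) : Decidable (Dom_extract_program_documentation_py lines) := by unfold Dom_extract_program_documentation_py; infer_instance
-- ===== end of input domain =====

-- B replaces A's flag state machine with an index-comprehension + slicing pipeline (no speed claim).

-- ===== PORT A =====
-- the for-loop of A: state = (accumulated doc_lines, in_id_division flag); 'break' returns the accumulator
def pvA_loop : List String → List String → Bool → List String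
  | [], doc, _ => doc
  | l :: rest, doc, flag =>
    if PySem.Str.isIn "IDENTIFICATION DIVISION" l then pvA_loop rest doc true
    else if flag && PySem.Str.isIn "DIVISION" l then doc
    else
      let s := PySem.Str.strip l
      if flag && s != "" && !(PySem.Str.endswith s ".") then pvA_loop rest (doc ++ [s]) flag
      else pvA_loop rest doc flag

def extract_program_documentation_py (lines : List String) : Option String :=
  let doc := pvA_loop lines [] false
  if doc.isEmpty then none else some (PySem.Str.join "\n" doc)

-- ===== PORT B =====
-- hits / stops are the index comprehensions of Source B; body is its slice; doc its filtered comprehension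
def extract_program_documentation_py_alt (lines : List String) : Option String :=
  let hits := ((PySem.List.enumerate lines).filter
    (fun p => PySem.Str.isIn "IDENTIFICATION DIVISION" p.2)).map (fun p => p.1)
  match hits with
  | [] => none
  | i :: _ =>
    let after := PySem.List.slice lines (some (i + 1)) none
    let stops := ((PySem.List.enumerate after).filter
      (fun p => PySem.Str.isIn "DIVISION" p.2)).map (fun p => p.1)
    let body := match stops with
      | [] => after
      | j :: _ => PySem.List.slice after none (some j)
    let doc := (body.map (fun l => PySem.Str.strip l)).filter
      (fun s => s != "" && !(PySem.Str.endswith s "."))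
    if doc.isEmpty then none else some (PySem.Str.join "\n" doc)

-- ===== PRECONDITION & SPEC =====
-- Pre_ excludes lists in which more than one line contains 'IDENTIFICATION DIVISION': on such
-- malformed input A accidentally skips the repeated header lines while B stops at them, and
-- neither behaviour is the specified one.
def Pre_extract_program_documentation_py (lines : List String) : Prop :=
  lines.countP (fun l => PySem.Str.isIn "IDENTIFICATION DIVISION" l) ≤ 1
instance (lines : List String) : Decidable (Pre_extract_program_documentation_py lines) := by
  unfold Pre_extract_program_documentation_py; infer_instance

def pvWitness_extract_program_documentation_py : List String :=
  ["IDENTIFICATION DIVISION.", "  my doc", "PROCEDURE DIVISION."]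

def Spec_extract_program_documentation_py (lines : List String) (out : Option String) : Prop := out = extract_program_documentation_py_alt lines
instance (lines : List String) (out : Option String) : Decidable (Spec_extract_program_documentation_py lines out) := by unfold Spec_extract_program_documentation_py; infer_instance

-- ===== CLAIM =====
def Claim_equal_extract_program_documentation_py : Prop := ∀ (lines : List String), Dom_extract_program_documentation_py lines → Pre_extract_program_documentation_py lines → Spec_extract_program_documentation_py lines (extract_program_documentation_py lines)

-- ===== LEMMAS AND PROOFS =====

-- proof-side mid-form: locate the header structurally, collect the doc lines by takeWhile/map/filter
def pvLocate : List String → Option (List String)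
  | [] => none
  | l :: rest =>
    if PySem.Str.isIn "IDENTIFICATION DIVISION" l then some rest else pvLocate rest

def pvCollect (rest : List String) : List String :=
  ((rest.takeWhile (fun l => !(PySem.Str.isIn "DIVISION" l))).map
    (fun l => PySem.Str.strip l)).filter (fun s => s != "" && !(PySem.Str.endswith s "."))

-- structural twin of pvCollect, matching pvA_loop's branch order
def pvCollectS : List String → List String
  | [] => []
  | l :: rest =>
    if PySem.Str.isIn "DIVISION" l then []
    else
      let s := PySem.Str.strip l
      if s != "" && !(PySem.Str.endswith s ".") then s :: pvCollectS rest
      else pvCollectS rest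

-- selectors naming the two match expressions of port B
def pvLocSel (xs : List String) (s : Int) : List Int → Option (List String)
  | [] => none
  | i :: _ => some (PySem.List.slice xs (some (i + 1 - s)))

def pvBodySel (xs : List String) (s : Int) : List Int → List String
  | [] => xs
  | j :: _ => PySem.List.slice xs none (some (j - s))

-- cons shape of an index comprehension
theorem pv_hits_cons (p : String → Bool) (x : String) (xs : List String) (s : Int) :
    ((PySem.List.enumerate (x :: xs) s).filter (fun q => p q.2)).map (fun q => q.1)
    = (if p x then [s] else []) ++
      ((PySem.List.enumerate xs (s + 1)).filter (fun q => p q.2)).map (fun q => q.1) := by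
  simp only [PySem.List.enumerate_cons, List.filter_cons]
  split <;> simp

-- every index produced by an index comprehension started at s is ≥ s
theorem pv_hits_lb (p : String → Bool) (xs : List String) (s : Int) (i : Int)
    (h : i ∈ ((PySem.List.enumerate xs s).filter (fun q => p q.2)).map (fun q => q.1)) :
    s ≤ i := by
  rcases List.mem_map.mp h with ⟨q, hq, rfl⟩
  have hmem : q ∈ PySem.List.enumerate xs s := List.mem_of_mem_filter hq
  rcases (PySem.List.mem_enumerate_iff xs s q).mp hmem with ⟨k, hk, rfl⟩
  simp only []
  omega

-- phase 1 of B computes pvLocate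
theorem pv_locate_eq (xs : List String) : ∀ (s : Int), 0 ≤ s →
    pvLocSel xs s (((PySem.List.enumerate xs s).filter
      (fun q => PySem.Str.isIn "IDENTIFICATION DIVISION" q.2)).map (fun q => q.1))
    = pvLocate xs := by
  induction xs with
  | nil => intro s hs; simp [PySem.List.enumerate_nil, pvLocSel, pvLocate]
  | cons x tl ih =>
    intro s hs
    rw [pv_hits_cons]
    by_cases hx : PySem.Str.isIn "IDENTIFICATION DIVISION" x = true
    · simp only [hx, if_pos, List.singleton_append, pvLocSel, pvLocate, add_sub_cancel_left]
      rw [PySem.List.slice_from_one]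
      rfl
    · simp only [hx, Bool.false_eq_true, if_neg, not_false_eq_true, List.nil_append, pvLocate]
      rw [← ih (s + 1) (by omega)]
      cases h : ((PySem.List.enumerate tl (s + 1)).filter
          (fun q => PySem.Str.isIn "IDENTIFICATION DIVISION" q.2)).map (fun q => q.1) with
      | nil => simp [pvLocSel]
      | cons i t =>
        have hi : s + 1 ≤ i := pv_hits_lb _ tl (s + 1) i (h ▸ List.mem_cons_self)
        simp only [pvLocSel, Option.some.injEq]
        rw [PySem.List.slice_from _ (by omega : (0:Int) ≤ i + 1 - s),
          PySem.List.slice_from _ (by omega : (0:Int) ≤ i + 1 - (s + 1))]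
        have hn : (i + 1 - s).toNat = (i + 1 - (s + 1)).toNat + 1 := by omega
        rw [hn, List.drop_succ_cons]

-- phases 2–3 of B (stops + slice) compute a takeWhile
theorem pv_body_eq (xs : List String) : ∀ (s : Int), 0 ≤ s →
    pvBodySel xs s (((PySem.List.enumerate xs s).filter
      (fun q => PySem.Str.isIn "DIVISION" q.2)).map (fun q => q.1))
    = xs.takeWhile (fun l => !(PySem.Str.isIn "DIVISION" l)) := by
  induction xs with
  | nil => intro s hs; simp [PySem.List.enumerate_nil, pvBodySel]
  | cons x tl ih =>
    intro s hs
    rw [pv_hits_cons]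
    by_cases hx : PySem.Str.isIn "DIVISION" x = true
    · simp only [hx, if_pos, List.singleton_append, pvBodySel, List.takeWhile_cons,
        Bool.not_true, sub_self]
      rw [PySem.List.slice_to _ (le_refl (0:Int))]
      simp
    · simp only [hx, Bool.false_eq_true, if_neg, not_false_eq_true, List.nil_append,
        List.takeWhile_cons, Bool.not_false, if_pos]
      rw [← ih (s + 1) (by omega)]
      cases h : ((PySem.List.enumerate tl (s + 1)).filter
          (fun q => PySem.Str.isIn "DIVISION" q.2)).map (fun q => q.1) with
      | nil => simp [pvBodySel]
      | cons j t =>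
        have hj : s + 1 ≤ j := pv_hits_lb _ tl (s + 1) j (h ▸ List.mem_cons_self)
        simp only [pvBodySel]
        rw [PySem.List.slice_to _ (by omega : (0:Int) ≤ j - s),
          PySem.List.slice_to _ (by omega : (0:Int) ≤ j - (s + 1))]
        have hn : (j - s).toNat = (j - (s + 1)).toNat + 1 := by omega
        rw [hn, List.take_succ_cons]

-- B in terms of the mid-form
theorem pv_alt_eq (lines : List String) :
    extract_program_documentation_py_alt lines
    = match pvLocate lines with
      | none => none
      | some rest =>
        if (pvCollect rest).isEmpty then none else some (PySem.Str.join "\n" (pvCollect rest)) := by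
  have h1 := pv_locate_eq lines 0 le_rfl
  cases h : ((PySem.List.enumerate lines).filter
      (fun q => PySem.Str.isIn "IDENTIFICATION DIVISION" q.2)).map (fun q => q.1) with
  | nil =>
    rw [h] at h1; simp only [pvLocSel] at h1
    simp only [extract_program_documentation_py_alt, h, ← h1]
  | cons i t =>
    rw [h] at h1; simp only [pvLocSel, sub_zero] at h1
    have h2 := pv_body_eq (PySem.List.slice lines (some (i + 1)) none) 0 le_rfl
    cases h2c : ((PySem.List.enumerate (PySem.List.slice lines (some (i + 1)) none)).filter
        (fun q => PySem.Str.isIn "DIVISION" q.2)).map (fun q => q.1) with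
    | nil =>
      rw [h2c] at h2; simp only [pvBodySel] at h2
      simp only [extract_program_documentation_py_alt, h, h2c, ← h1, pvCollect, ← h2]
    | cons j t2 =>
      rw [h2c] at h2; simp only [pvBodySel, sub_zero] at h2
      simp only [extract_program_documentation_py_alt, h, h2c, ← h1, pvCollect, ← h2]

-- pvCollectS is pvCollect
theorem pvCollectS_eq (rest : List String) : pvCollectS rest = pvCollect rest := by
  induction rest with
  | nil => simp [pvCollectS, pvCollect]
  | cons l tl ih =>
    by_cases hd : PySem.Str.isIn "DIVISION" l = true
    · simp only [pvCollectS, pvCollect, List.takeWhile_cons, hd, Bool.not_true,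
        Bool.false_eq_true, if_neg, not_false_eq_true, if_pos, List.map_nil, List.filter_nil]
    · simp only [pvCollectS, pvCollect, List.takeWhile_cons, hd, Bool.false_eq_true, if_neg,
        not_false_eq_true, Bool.not_false, if_pos, List.map_cons, List.filter_cons]
      rw [ih, pvCollect]

-- once the flag is set and no further header line occurs, A's loop appends exactly pvCollectS
theorem pvA_loop_true (rest : List String)
    (hno : ∀ x ∈ rest, PySem.Str.isIn "IDENTIFICATION DIVISION" x = false) :
    ∀ doc : List String, pvA_loop rest doc true = doc ++ pvCollectS rest := by
  induction rest with
  | nil => intro doc; simp [pvA_loop, pvCollectS]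
  | cons l tl ih =>
    intro doc
    have hl : PySem.Str.isIn "IDENTIFICATION DIVISION" l = false := hno l List.mem_cons_self
    have htl : ∀ x ∈ tl, PySem.Str.isIn "IDENTIFICATION DIVISION" x = false :=
      fun x hx => hno x (List.mem_cons_of_mem l hx)
    simp only [pvA_loop, pvCollectS, hl, Bool.false_eq_true, if_neg, not_false_eq_true,
      Bool.true_and]
    split_ifs <;> simp [ih htl]

-- before the flag is set, A's loop performs pvLocate and then pvCollectS (at most one header line)
theorem pvA_loop_false (lines : List String)
    (hpre : lines.countP (fun l => PySem.Str.isIn "IDENTIFICATION DIVISION" l) ≤ 1) :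
    pvA_loop lines [] false
    = match pvLocate lines with
      | none => []
      | some rest => pvCollectS rest := by
  induction lines with
  | nil => simp [pvA_loop, pvLocate]
  | cons l tl ih =>
    by_cases hl : PySem.Str.isIn "IDENTIFICATION DIVISION" l = true
    · have hcnt : tl.countP (fun l => PySem.Str.isIn "IDENTIFICATION DIVISION" l) = 0 := by
        have := List.countP_cons_of_pos
          (p := fun l => PySem.Str.isIn "IDENTIFICATION DIVISION" l) (l := tl) (by simpa using hl)
        omega
      have hno : ∀ x ∈ tl, PySem.Str.isIn "IDENTIFICATION DIVISION" x = false := by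
        intro x hx
        have := (List.countP_eq_zero).mp hcnt x hx
        simpa using this
      simp only [pvA_loop, hl, if_pos, pvLocate]
      exact pvA_loop_true tl hno []
    · have hpre' : tl.countP (fun l => PySem.Str.isIn "IDENTIFICATION DIVISION" l) ≤ 1 := by
        have := List.countP_cons_of_neg
          (p := fun l => PySem.Str.isIn "IDENTIFICATION DIVISION" l) (l := tl) (by simpa using hl)
        omega
      simp only [pvA_loop, hl, Bool.false_eq_true, if_neg, not_false_eq_true, Bool.false_and,
        pvLocate]
      exact ih hpre'

-- ===== VERDICT =====
theorem extract_program_documentation_py_spec : Claim_equal_extract_program_documentation_py := by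
  intro lines _ hpre
  unfold Spec_extract_program_documentation_py extract_program_documentation_py
  rw [pv_alt_eq, pvA_loop_false lines hpre]
  cases h : pvLocate lines with
  | none => simp
  | some rest => simp [pvCollectS_eq]
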